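-- pv_equiv track=rewrite | github.com/snus1ik/alg-analysis-5sem | AA6/code/algorithms.py | naive_algorithm
-- ===== SOURCE A (Python) =====
-- from itertools import permutations
--
-- def naive_algorithm(graph: list[list[int]]) -> (int, list[int]):
--     """
--     Функция для решения задачи коммивояжера(поиск минимального пути в графе) полным перебором
--     :param graph: Матрица смежности некого графа значение graph[i][j] соответствует "цене" прохода
--     из вершины i в вершину j
--     :return: возвращает минимальную "цену" пути, проходящего по всем
--     вершинам графа по одному разу(без цикла),
--     а также сам этот путь в формате списка вершин в очередности их обхода
--     """
--     if len(graph) == 0: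
--         return -1, None
--     if len(graph[0]) != len(graph):
--         return -1, None
--     n = len(graph)
--     # Все варианты прохода по графу (по варианту - не замкнутый маршрут)
--     options = list(permutations(range(n)))
--     best_route = []
--     best_summ = -1
--     for option in options:
--         summ = 0
--         for i in range(len(option) - 1):
--             # если нет пути из i в j, такой маршрут не подойдет
--             if graph[option[i]][option[i + 1]] <= 0:
--                 summ = -1
--                 break
--             summ += graph[option[i]][option[i + 1]]
--         if summ == -1:
--             continue
--         if best_summ == -1:
--             best_summ = summ
--             best_route = option
--         elif summ < best_summ:
--             best_summ = summ
--             best_route = option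
--     return best_summ, list(best_route)
-- ===== SOURCE B (Python) =====
-- def naive_algorithm(graph: list[list[int]]) -> (int, list[int]):
--     """Branch-and-bound DFS over partial routes instead of scoring every full
--     permutation: dead edges (<= 0) and partial costs already >= the best found
--     are pruned, and no permutation list is ever materialised."""
--     if len(graph) == 0:
--         return -1, None
--     if len(graph[0]) != len(graph):
--         return -1, None
--     n = len(graph)
--     best = [-1, []]
--
--     def dfs(last, remaining, cost, path):
--         if best[0] != -1 and best[0] <= cost:
--             return
--         if not remaining:
--             if best[0] == -1 or cost < best[0]:
--                 best[0] = cost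
--                 best[1] = path
--             return
--         for v in remaining:
--             w = graph[last][v]
--             if w > 0:
--                 nxt = remaining.copy()
--                 nxt.remove(v)
--                 dfs(v, nxt, cost + w, path + [v])
--
--     for s in range(n):
--         dfs(s, [v for v in range(n) if v != s], 0, [s])
--     return best[0], list(best[1])
-- ===== Notes on version B (the rewrite author's own statement) =====
-- stated objective: faster
-- what changed: Replaced materialising and scoring every permutation with a recursive branch-and-bound DFS over partial routes that skips non-edges immediately and prunes any partial route whose cost already reaches the best complete route found.
import Mathlib
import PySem

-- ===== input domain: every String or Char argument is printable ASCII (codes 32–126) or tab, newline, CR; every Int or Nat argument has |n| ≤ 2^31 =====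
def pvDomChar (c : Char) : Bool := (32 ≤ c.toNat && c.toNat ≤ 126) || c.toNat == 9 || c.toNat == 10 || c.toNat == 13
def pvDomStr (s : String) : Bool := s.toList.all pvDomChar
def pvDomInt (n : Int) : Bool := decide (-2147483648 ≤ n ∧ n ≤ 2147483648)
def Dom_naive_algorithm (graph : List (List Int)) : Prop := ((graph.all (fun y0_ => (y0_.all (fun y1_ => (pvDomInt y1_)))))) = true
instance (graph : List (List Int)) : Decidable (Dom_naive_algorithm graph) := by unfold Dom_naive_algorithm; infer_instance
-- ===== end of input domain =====

-- B replaces A's exhaustive scoring of every materialised permutation by a recursive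
-- branch-and-bound DFS over partial routes (faster by pruning; same return value).

-- ===== PORT A =====

-- graph[a][b]; exact for indices Python accepts (incl. negative wrap); the getD 0
-- default is only reached where Python raises IndexError (excluded by Pre_).
def pvGet2 (graph : List (List Int)) (a b : Int) : Int :=
  (((PySem.List.pyGet? graph a).bind (fun row => PySem.List.pyGet? row b)).getD 0)

-- A's inner loop: for i in range(len(option)-1): … with break-on-nonpositive.
def aLoop (graph : List (List Int)) : Int → List Int → Int
  | acc, a :: b :: rest =>
      let w := pvGet2 graph a b
      if w ≤ 0 then -1 else aLoop graph (acc + w) (b :: rest)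
  | acc, _ => acc

-- list(permutations(pool)) in the order itertools yields them (lexicographic in pool order)
def permsA (pool : List Int) : List (List Int) :=
  if h : pool = [] then [[]]
  else pool.attach.flatMap (fun x => (permsA (pool.erase x.1)).map (x.1 :: ·))
termination_by pool.length
decreasing_by
  have hx := List.length_erase_of_mem x.2
  have hp : 0 < pool.length := List.length_pos_iff.mpr h
  omega

-- A's body of 'for option in options'
def aStep (graph : List (List Int)) (st : Int × List Int) (option : List Int) : Int × List Int :=
  let summ := aLoop graph 0 option
  if summ = -1 then st
  else if st.1 = -1 then (summ, option)
  else if summ < st.1 then (summ, option)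
  else st

def naive_algorithm (graph : List (List Int)) : Int × Option (List Int) :=
  if (graph.length : Int) = 0 then (-1, none)
  else if ((((PySem.List.pyGet? graph 0).getD []).length : Int)) ≠ (graph.length : Int) then (-1, none)
  else
    let r := (permsA (PySem.List.pyRange 0 (graph.length : Int) 1)).foldl (aStep graph) (-1, [])
    (r.1, some r.2)

-- ===== PORT B =====

-- Source B's dfs: prune on cost ≥ best, recurse over remaining vertices with remove(v)
def bDfs (graph : List (List Int)) (last : Int) (remaining : List Int) (cost : Int)
    (path : List Int) (best : Int × List Int) : Int × List Int :=
  if best.1 ≠ -1 ∧ best.1 ≤ cost then best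
  else if h : remaining = [] then
    (if best.1 = -1 ∨ cost < best.1 then (cost, path) else best)
  else
    remaining.attach.foldl (fun b v =>
      let w := pvGet2 graph last v.1
      if 0 < w then bDfs graph v.1 (remaining.erase v.1) (cost + w) (path ++ [v.1]) b else b) best
termination_by remaining.length
decreasing_by
  have hx := List.length_erase_of_mem v.2
  have hp : 0 < remaining.length := List.length_pos_iff.mpr h
  omega

def naive_algorithm_alt (graph : List (List Int)) : Int × Option (List Int) :=
  if (graph.length : Int) = 0 then (-1, none)
  else if ((((PySem.List.pyGet? graph 0).getD []).length : Int)) ≠ (graph.length : Int) then (-1, none)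
  else
    let rng := PySem.List.pyRange 0 (graph.length : Int) 1
    let r := rng.foldl (fun b s => bDfs graph s (rng.filter (fun v => v != s)) 0 [s] b) (-1, [])
    (r.1, some r.2)

-- ===== PRECONDITION & SPEC =====
-- Pre_ excludes exactly the ragged matrices on which A raises IndexError: row 0 has
-- length n but an earlier row is shorter than n, or the last row shorter than n-1
-- (the last row's column n-1 entry is never read, so it may have n-1 entries; B raises there too).
def Pre_naive_algorithm (graph : List (List Int)) : Prop :=
  graph = [] ∨ (graph.headD []).length ≠ graph.length ∨
    ((∀ row ∈ graph.dropLast, graph.length ≤ row.length) ∧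
      graph.length - 1 ≤ ((graph.getLast?).getD []).length)
instance (graph : List (List Int)) : Decidable (Pre_naive_algorithm graph) := by
  unfold Pre_naive_algorithm; infer_instance
def pvWitness_naive_algorithm : List (List Int) := [[0, 5], [3, 0]]

def Spec_naive_algorithm (graph : List (List Int)) (out : Int × Option (List Int)) : Prop := out = naive_algorithm_alt graph
instance (graph : List (List Int)) (out : Int × Option (List Int)) : Decidable (Spec_naive_algorithm graph out) := by unfold Spec_naive_algorithm; infer_instance

-- ===== CLAIM (what is proved, stated in full; the proofs are below) =====
def Claim_equal_naive_algorithm : Prop := ∀ (graph : List (List Int)), Dom_naive_algorithm graph → Pre_naive_algorithm graph → Spec_naive_algorithm graph (naive_algorithm graph)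

-- ===== LEMMAS AND PROOFS =====

-- Source B's dfs without the branch-and-bound prune (proof-only reference)
def plainDfs (graph : List (List Int)) (last : Int) (remaining : List Int) (cost : Int)
    (path : List Int) (best : Int × List Int) : Int × List Int :=
  if h : remaining = [] then
    (if best.1 = -1 ∨ cost < best.1 then (cost, path) else best)
  else
    remaining.attach.foldl (fun b v =>
      let w := pvGet2 graph last v.1
      if 0 < w then plainDfs graph v.1 (remaining.erase v.1) (cost + w) (path ++ [v.1]) b else b) best
termination_by remaining.length
decreasing_by
  have hx := List.length_erase_of_mem v.2
  have hp : 0 < remaining.length := List.length_pos_iff.mpr h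
  omega

-- A's per-permutation step, re-expressed against a prefix (cost so far, last vertex, path)
def gStep (graph : List (List Int)) (cost last : Int) (path : List Int)
    (st : Int × List Int) (perm : List Int) : Int × List Int :=
  let summ := aLoop graph cost (last :: perm)
  if summ = -1 then st
  else if st.1 = -1 then (summ, path ++ perm)
  else if summ < st.1 then (summ, path ++ perm)
  else st

theorem foldl_flatMap' {α β γ : Type} (f : γ → β → γ) (g : α → List β) (l : List α) (init : γ) :
    (l.flatMap g).foldl f init = l.foldl (fun acc x => (g x).foldl f acc) init := by
  induction l generalizing init with
  | nil => rfl
  | cons x xs ih => simp [List.flatMap_cons, List.foldl_append, ih]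

theorem foldl_congr' {α β : Type} (f g : β → α → β) (l : List α) (init : β)
    (h : ∀ b, ∀ x ∈ l, f b x = g b x) : l.foldl f init = l.foldl g init := by
  induction l generalizing init with
  | nil => rfl
  | cons x xs ih =>
      simp only [List.foldl_cons, h init x (List.mem_cons_self), ih _ (fun b y hy => h b y (List.mem_cons_of_mem _ hy))]

theorem foldl_fix {α β : Type} (f : β → α → β) (l : List α) (b : β)
    (h : ∀ x ∈ l, f b x = b) : l.foldl f b = b := by
  induction l with
  | nil => rfl
  | cons x xs ih =>
      simp only [List.foldl_cons, h x (List.mem_cons_self)]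
      exact ih (fun y hy => h y (List.mem_cons_of_mem _ hy))

theorem plainDfs_noop (graph : List (List Int)) :
    ∀ (n : Nat) (remaining : List Int), remaining.length ≤ n →
      ∀ (last cost : Int) (path : List Int) (best : Int × List Int),
        best.1 ≠ -1 → best.1 ≤ cost →
        plainDfs graph last remaining cost path best = best := by
  intro n
  induction n with
  | zero =>
      intro remaining hlen last cost path best h1 h2
      have hr : remaining = [] := List.length_eq_zero_iff.mp (Nat.le_zero.mp hlen)
      subst hr
      rw [plainDfs]
      simp only [reduceDIte]
      have : ¬ (best.1 = -1 ∨ cost < best.1) := by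
        push_neg; exact ⟨h1, by omega⟩
      simp [this]
  | succ n ih =>
      intro remaining hlen last cost path best h1 h2
      rw [plainDfs]
      split
      · have : ¬ (best.1 = -1 ∨ cost < best.1) := by
          push_neg; exact ⟨h1, by omega⟩
        simp [this]
      · rename_i hne
        apply foldl_fix
        intro v _
        simp only
        split
        · rename_i hw
          apply ih
          · have hx := List.length_erase_of_mem v.2
            have hp : 0 < remaining.length := List.length_pos_iff.mpr hne
            omega
          · exact h1
          · omega
        · rfl

theorem bDfs_eq_plain (graph : List (List Int)) :
    ∀ (n : Nat) (remaining : List Int), remaining.length ≤ n →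
      ∀ (last cost : Int) (path : List Int) (best : Int × List Int),
        bDfs graph last remaining cost path best = plainDfs graph last remaining cost path best := by
  intro n
  induction n with
  | zero =>
      intro remaining hlen last cost path best
      have hr : remaining = [] := List.length_eq_zero_iff.mp (Nat.le_zero.mp hlen)
      subst hr
      rw [bDfs, plainDfs]
      by_cases hp : best.1 ≠ -1 ∧ best.1 ≤ cost
      · rw [if_pos hp, dif_pos rfl, if_neg (by push_neg; exact ⟨hp.1, by omega⟩)]
      · rw [if_neg hp]
        simp only [reduceDIte]
  | succ n ih =>
      intro remaining hlen last cost path best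
      rw [bDfs, plainDfs]
      by_cases hp : best.1 ≠ -1 ∧ best.1 ≤ cost
      · rw [if_pos hp]
        split
        · rw [if_neg (by push_neg; exact ⟨hp.1, by omega⟩)]
        · rename_i hne
          symm
          apply foldl_fix
          intro v _
          simp only
          split
          · rename_i hw
            apply plainDfs_noop graph n
            · have hx := List.length_erase_of_mem v.2
              have hpos : 0 < remaining.length := List.length_pos_iff.mpr hne
              omega
            · exact hp.1
            · omega
          · rfl
      · rw [if_neg hp]
        split
        · rfl
        · rename_i hne
          apply foldl_congr'
          intro b v hv
          simp only
          split
          · apply ih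
            have hx := List.length_erase_of_mem v.2
            have hpos : 0 < remaining.length := List.length_pos_iff.mpr hne
            omega
          · rfl

theorem gStep_nil (graph : List (List Int)) (cost last : Int) (path : List Int)
    (st : Int × List Int) (hne : cost ≠ -1) :
    gStep graph cost last path st [] = (if st.1 = -1 ∨ cost < st.1 then (cost, path) else st) := by
  unfold gStep
  simp only [aLoop, List.append_nil]
  rw [if_neg hne]
  by_cases h1 : st.1 = -1
  · simp [h1]
  · by_cases h2 : cost < st.1 <;> simp [h1, h2]

theorem plain_eq_fold (graph : List (List Int)) :
    ∀ (n : Nat) (pool : List Int), pool.length ≤ n →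
      ∀ (last cost : Int) (path : List Int) (st : Int × List Int), 0 ≤ cost →
        plainDfs graph last pool cost path st
          = (permsA pool).foldl (gStep graph cost last path) st := by
  intro n
  induction n with
  | zero =>
      intro pool hlen last cost path st hc
      have hr : pool = [] := List.length_eq_zero_iff.mp (Nat.le_zero.mp hlen)
      subst hr
      rw [plainDfs, permsA]
      simp only [reduceDIte, List.foldl_cons, List.foldl_nil]
      rw [gStep_nil graph cost last path st (by omega)]
  | succ n ih =>
      intro pool hlen last cost path st hc
      by_cases hnil : pool = []
      · subst hnil
        rw [plainDfs, permsA]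
        simp only [reduceDIte, List.foldl_cons, List.foldl_nil]
        rw [gStep_nil graph cost last path st (by omega)]
      · rw [plainDfs, permsA]
        simp only [dif_neg hnil]
        rw [foldl_flatMap']
        apply foldl_congr'
        intro b v hv
        rw [List.foldl_map]
        by_cases hw : 0 < pvGet2 graph last v.1
        · simp only [if_pos hw]
          have hlen' : (pool.erase v.1).length ≤ n := by
            have hx := List.length_erase_of_mem v.2
            have hpos : 0 < pool.length := List.length_pos_iff.mpr hnil
            omega
          rw [ih (pool.erase v.1) hlen' v.1 (cost + pvGet2 graph last v.1) (path ++ [v.1]) b (by omega)]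
          apply foldl_congr'
          intro b' perm _
          unfold gStep
          simp only [aLoop]
          have hng : ¬ pvGet2 graph last v.1 ≤ 0 := by omega
          simp only [if_neg hng, List.append_assoc, List.singleton_append]
        · simp only [if_neg hw]
          symm
          apply foldl_fix
          intro perm _
          unfold gStep
          simp only [aLoop]
          have hle : pvGet2 graph last v.1 ≤ 0 := by omega
          simp [hle]

theorem naive_eq (graph : List (List Int)) : naive_algorithm graph = naive_algorithm_alt graph := by
  unfold naive_algorithm naive_algorithm_alt
  by_cases h0 : (graph.length : Int) = 0
  · rw [if_pos h0, if_pos h0]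
  · rw [if_neg h0, if_neg h0]
    by_cases hl : ((((PySem.List.pyGet? graph 0).getD []).length : Int)) ≠ (graph.length : Int)
    · rw [if_pos hl, if_pos hl]
    · rw [if_neg hl, if_neg hl]
      set R : List Int := PySem.List.pyRange 0 (graph.length : Int) 1 with hR
      have hRnil : R ≠ [] := by
        intro hcon
        have hm : (0 : Int) ∈ R := by
          rw [hR, PySem.List.mem_pyRange_one]
          constructor
          · omega
          · omega
        rw [hcon] at hm
        exact (List.not_mem_nil hm)
      have hnd : R.Nodup := by rw [hR]; exact PySem.List.nodup_pyRange_one _ _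
      have key : (permsA R).foldl (aStep graph) (-1, [])
          = R.foldl (fun b s => bDfs graph s (R.filter (fun v => v != s)) 0 [s] b) (-1, []) := by
        rw [permsA]
        simp only [dif_neg hRnil]
        rw [foldl_flatMap']
        have hB : R.foldl (fun b s => bDfs graph s (R.filter (fun v => v != s)) 0 [s] b) (-1, ([] : List Int))
            = R.attach.foldl (fun b v => bDfs graph v.1 (R.filter (fun u => u != v.1)) 0 [v.1] b) (-1, []) :=
          (List.foldl_attach).symm
        rw [hB]
        apply foldl_congr'
        intro b v hv
        rw [List.foldl_map]
        have h1 : (fun (st : Int × List Int) (perm : List Int) => aStep graph st (v.1 :: perm))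
            = gStep graph 0 v.1 [v.1] := by
          funext st perm
          unfold aStep gStep
          simp
        rw [h1]
        rw [← plain_eq_fold graph (R.erase v.1).length (R.erase v.1) le_rfl v.1 0 [v.1] b le_rfl]
        rw [hnd.erase_eq_filter v.1]
        exact (bDfs_eq_plain graph (R.filter (fun u => u != v.1)).length _ le_rfl v.1 0 [v.1] b).symm
      simp only [key]

-- ===== VERDICT (by name: the statement is the Claim_ definition above) =====
theorem naive_algorithm_spec : Claim_equal_naive_algorithm := by
  intro graph _ _
  unfold Spec_naive_algorithm
  exact naive_eq graph
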